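-- pv_equiv track=rewrite | github.com/SuperAsneiitor/timerParse | lib/parsers/format2_parser.py | _lastNumericTokens
-- ===== SOURCE A (Python) =====
-- def _lastNumericTokens(text: str, n: int) -> list[str]:
--     parts = text.strip().split()
--     out: list[str] = []
--     for i in range(len(parts) - 1, -1, -1):
--         if len(out) >= n:
--             break
--         s = parts[i]
--         if s and s.lstrip("-").replace(".", "", 1).isdigit():
--             out.append(s)
--     out.reverse()
--     return out
-- ===== SOURCE B (Python) =====
-- def _lastNumericTokens(text: str, n: int) -> list[str]:
--     result = [s for s in text.strip().split()
--               if s and s.lstrip("-").replace(".", "", 1).isdigit()]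
--     return result[max(0, len(result) - n):]
-- ===== Notes on version B (the rewrite author's own statement) =====
-- stated objective: simpler
-- what changed: Replaces the backward early-break loop plus final reverse with a forward filter of all numeric tokens followed by a tail slice result[max(0, len(result)-n):].
import Mathlib
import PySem

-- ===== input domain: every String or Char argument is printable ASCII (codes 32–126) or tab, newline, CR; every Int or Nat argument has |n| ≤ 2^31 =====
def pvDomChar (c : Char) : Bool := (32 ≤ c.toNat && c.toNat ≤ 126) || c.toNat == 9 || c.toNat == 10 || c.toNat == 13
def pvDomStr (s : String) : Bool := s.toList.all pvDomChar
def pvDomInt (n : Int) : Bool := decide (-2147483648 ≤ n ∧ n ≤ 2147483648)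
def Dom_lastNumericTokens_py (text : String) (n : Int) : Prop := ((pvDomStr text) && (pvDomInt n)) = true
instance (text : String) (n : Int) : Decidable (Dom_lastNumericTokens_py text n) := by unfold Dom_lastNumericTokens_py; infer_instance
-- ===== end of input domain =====

-- B replaces A's backward early-break loop + reverse by a forward filter and a tail slice (objective: simpler).

-- shared token predicate: Python's  s and s.lstrip("-").replace(".", "", 1).isdigit()
-- s.lstrip("-"): drop leading '-' characters (exact: the chars set is {'-'})
def pvLstripDash (cs : List Char) : List Char := cs.dropWhile (· == '-')
-- s.replace(".", "", 1): remove the first '.' if any (exact: old is one char, count 1)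
def pvDropFirstDot : List Char → List Char
  | [] => []
  | c :: rest => if c = '.' then rest else c :: pvDropFirstDot rest
def pvNumTok (s : String) : Bool :=
  !s.toList.isEmpty && PySem.Chars.strIsdigit (pvDropFirstDot (pvLstripDash s.toList))

-- ===== PORT A =====
-- the for-loop over range(len(parts)-1, -1, -1) with its break, fuel i+1 ↦ index i
def pvLoopA (parts : List String) (n : Int) : Nat → List String → List String
  | 0, out => out
  | i+1, out =>
    if (out.length : Int) ≥ n then out
    else
      let s := parts.getD i ""
      if pvNumTok s then pvLoopA parts n i (out ++ [s]) else pvLoopA parts n i out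

def lastNumericTokens_py (text : String) (n : Int) : List String :=
  let parts := PySem.Str.split₀ (PySem.Str.strip text)
  (pvLoopA parts n parts.length []).reverse

-- ===== PORT B =====
def lastNumericTokens_py_alt (text : String) (n : Int) : List String :=
  let result := (PySem.Str.split₀ (PySem.Str.strip text)).filter pvNumTok
  PySem.List.slice result (some (max 0 ((result.length : Int) - n))) none

-- ===== PRECONDITION & SPEC =====
def Spec_lastNumericTokens_py (text : String) (n : Int) (out : List String) : Prop := out = lastNumericTokens_py_alt text n
instance (text : String) (n : Int) (out : List String) : Decidable (Spec_lastNumericTokens_py text n out) := by unfold Spec_lastNumericTokens_py; infer_instance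

-- ===== CLAIM (what is proved, stated in full; the proofs are below) =====
def Claim_equal_lastNumericTokens_py : Prop := ∀ (text : String) (n : Int), Dom_lastNumericTokens_py text n → Spec_lastNumericTokens_py text n (lastNumericTokens_py text n)

-- ===== LEMMAS AND PROOFS =====

-- the last (max k 0) elements of l
def pvLastK (l : List String) (k : Int) : List String := l.drop (l.length - k.toNat)

lemma pvLastK_nonpos (l : List String) (k : Int) (hk : k ≤ 0) : pvLastK l k = [] := by
  have : k.toNat = 0 := by omega
  simp [pvLastK, this]

lemma pvLastK_append_singleton (l : List String) (s : String) (k : Int) (hk : 1 ≤ k) :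
    pvLastK (l ++ [s]) k = pvLastK l (k - 1) ++ [s] := by
  unfold pvLastK
  have h1 : l.length + 1 - k.toNat ≤ l.length := by omega
  rw [List.length_append, List.length_singleton,
      List.drop_append_of_le_length h1]
  have h2 : l.length + 1 - k.toNat = l.length - (k - 1).toNat := by omega
  rw [h2]

lemma pvLoopA_spec (parts : List String) (n : Int) :
    ∀ i out, i ≤ parts.length →
      pvLoopA parts n i out
        = out ++ (pvLastK ((parts.take i).filter pvNumTok) (n - out.length)).reverse := by
  intro i
  induction i with
  | zero =>
      intro out _
      simp [pvLoopA, pvLastK]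
  | succ i ih =>
      intro out hle
      have hi : i < parts.length := by omega
      have hget : parts.getD i "" = parts[i] := List.getD_eq_getElem parts "" hi
      have hTake : (parts.take (i+1)).filter pvNumTok
          = (parts.take i).filter pvNumTok
            ++ (if pvNumTok parts[i] then [parts[i]] else []) := by
        rw [List.take_add_one, List.filter_append]
        simp only [hi, List.getElem?_eq_getElem, Option.toList_some]
        cases h : pvNumTok parts[i] <;> simp [List.filter, h]
      by_cases hbrk : (out.length : Int) ≥ n
      · have : n - (out.length : Int) ≤ 0 := by omega
        simp [pvLoopA, hbrk, pvLastK_nonpos _ _ this]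
      · by_cases hnum : pvNumTok parts[i]
        · have := ih (out ++ [parts[i]]) (by omega)
          simp only [pvLoopA, hbrk, if_false, hget, hnum, if_true, this, hTake]
          rw [pvLastK_append_singleton _ _ _ (by omega)]
          simp
          ring_nf
        · have := ih out (by omega)
          simp only [pvLoopA, hbrk, if_false, hget, hnum, if_false, this, hTake]
          simp

-- ===== VERDICT (by name: the statement is the Claim_ definition above) =====
theorem lastNumericTokens_py_spec : Claim_equal_lastNumericTokens_py := by
  intro text n _
  unfold Spec_lastNumericTokens_py
  show (lastNumericTokens_py text n) = _
  have key : ∀ (parts : List String),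
      (pvLoopA parts n parts.length []).reverse
        = PySem.List.slice (parts.filter pvNumTok)
            (some (max 0 (((parts.filter pvNumTok).length : Int) - n))) none := by
    intro parts
    have hstart : (0 : Int) ≤ max 0 (((parts.filter pvNumTok).length : Int) - n) :=
      le_max_left _ _
    rw [PySem.List.slice_from _ hstart,
        pvLoopA_spec parts n parts.length [] (le_refl _)]
    simp only [List.take_length, List.nil_append, List.reverse_reverse]
    unfold pvLastK
    by_cases hn : n ≤ 0
    · rw [List.drop_eq_nil_of_le (by omega), List.drop_eq_nil_of_le (by omega)]
    · congr 1
      simp only [List.length_nil, Nat.cast_zero, sub_zero]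
      omega
  exact key (PySem.Str.split₀ (PySem.Str.strip text))
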